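-- pv_equiv track=rewrite | github.com/StudyJudy/Courses_Year3-2 | 大三下/数据安全/资料/差分隐私/源码及工具/演示用完整代码/MWEM_2D.py | queryToBinary
-- ===== SOURCE A (Python) =====
-- def queryToBinary(qi, cols, rows):
--     binary = [[0]*cols for i in range(rows)]
--     # 这个地方操作原理和Evaluate以及1D情况下的ToBinary类似，不再赘述
--     q_x = list(qi)[0]
--     q_y = qi[q_x]
--     for i in range(rows):
--         if (i >= q_x[0]) and (i <= q_x[1]):
--             for j in range(cols):
--                 if (j >= q_y[0]) and (j <= q_y[1]):
--                     binary[i][j] = 1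
--     return binary
-- ===== SOURCE B (Python) =====
-- def queryToBinary(qi, cols, rows):
--     (row_lo, row_hi), (col_lo, col_hi) = next(iter(qi.items()))
--     if rows <= 0:
--         return []
--     ones = [1 if col_lo <= j <= col_hi else 0 for j in range(cols)]
--     zeros = [0] * cols
--     return [list(ones) if row_lo <= i <= row_hi else list(zeros) for i in range(rows)]
-- ===== Notes on version B (the rewrite author's own statement) =====
-- stated objective: alternative
-- what changed: B precomputes one 'ones' row and one 'zeros' row and assembles the matrix by choosing a copy of the right template per row, instead of testing every cell of a pre-built zero matrix with nested loops and in-place assignment.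
import Mathlib
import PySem

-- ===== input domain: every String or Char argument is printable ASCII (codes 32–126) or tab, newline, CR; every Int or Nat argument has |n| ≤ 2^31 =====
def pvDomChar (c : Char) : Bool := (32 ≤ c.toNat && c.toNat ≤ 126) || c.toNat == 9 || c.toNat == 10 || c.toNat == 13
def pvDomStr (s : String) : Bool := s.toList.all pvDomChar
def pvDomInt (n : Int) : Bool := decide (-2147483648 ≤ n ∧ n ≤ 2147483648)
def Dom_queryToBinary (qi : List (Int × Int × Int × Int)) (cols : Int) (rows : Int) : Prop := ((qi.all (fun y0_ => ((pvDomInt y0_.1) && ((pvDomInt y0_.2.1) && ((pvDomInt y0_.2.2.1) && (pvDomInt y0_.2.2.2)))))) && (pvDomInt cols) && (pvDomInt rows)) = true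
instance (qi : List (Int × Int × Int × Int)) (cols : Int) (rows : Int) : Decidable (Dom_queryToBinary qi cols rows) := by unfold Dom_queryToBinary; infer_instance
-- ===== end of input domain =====

-- B replaces A's nested cell-by-cell loops with two precomputed row templates
-- (a 'ones' row and a 'zeros' row) and a per-row choice; same cost, different decomposition.

-- ===== PORT A =====
-- literal port of A: zero matrix, first key q_x, dict lookup qi[q_x], nested loops setting cells to 1
def queryToBinary (qi : List (Int × Int × Int × Int)) (cols : Int) (rows : Int) : List (List Int) :=
  let binary := (PySem.List.pyRange 0 rows 1).map (fun _ => (PySem.List.pyRange 0 cols 1).map (fun _ => (0 : Int)))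
  match qi with
  | [] => []   -- Python: list(qi)[0] raises IndexError; excluded by Pre_
  | e :: _ =>
    let qx : Int × Int := (e.1, e.2.1)          -- q_x = list(qi)[0]
    -- q_y = qi[q_x]: dict lookup = first entry whose key equals q_x
    let qy : Int × Int :=
      match qi.find? (fun f => (f.1, f.2.1) == qx) with
      | some f => (f.2.2.1, f.2.2.2)
      | none => (0, 0)   -- unreachable: the head entry matches
    (PySem.List.pyRange 0 rows 1).foldl (fun b i =>
      if qx.1 ≤ i ∧ i ≤ qx.2 then
        (PySem.List.pyRange 0 cols 1).foldl (fun b' j =>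
          if qy.1 ≤ j ∧ j ≤ qy.2 then b'.modify i.toNat (fun row => row.set j.toNat 1) else b') b
      else b) binary

-- ===== PORT B =====
-- literal port of B: first item's key/value, one 'ones' row, one 'zeros' row, per-row choice
def queryToBinary_alt (qi : List (Int × Int × Int × Int)) (cols : Int) (rows : Int) : List (List Int) :=
  match qi with
  | [] => []   -- Python: next(iter(qi.items())) raises StopIteration; excluded by Pre_
  | (rlo, rhi, clo, chi) :: _ =>
    if rows ≤ 0 then [] else
    let ones := (PySem.List.pyRange 0 cols 1).map (fun j => if clo ≤ j ∧ j ≤ chi then (1 : Int) else 0)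
    let zeros := List.replicate cols.toNat (0 : Int)
    (PySem.List.pyRange 0 rows 1).map (fun i => if rlo ≤ i ∧ i ≤ rhi then ones else zeros)

-- ===== PRECONDITION & SPEC =====
-- Pre_ excludes only the empty dict, on which both A and B raise (IndexError / StopIteration).
def Pre_queryToBinary (qi : List (Int × Int × Int × Int)) (cols : Int) (rows : Int) : Prop := qi ≠ []
instance (qi : List (Int × Int × Int × Int)) (cols : Int) (rows : Int) : Decidable (Pre_queryToBinary qi cols rows) := by unfold Pre_queryToBinary; infer_instance

def pvWitness_queryToBinary : (List (Int × Int × Int × Int)) × Int × Int := ([(0, 1, 0, 1)], 3, 3)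

def Spec_queryToBinary (qi : List (Int × Int × Int × Int)) (cols : Int) (rows : Int) (out : List (List Int)) : Prop := out = queryToBinary_alt qi cols rows
instance (qi : List (Int × Int × Int × Int)) (cols : Int) (rows : Int) (out : List (List Int)) : Decidable (Spec_queryToBinary qi cols rows out) := by unfold Spec_queryToBinary; infer_instance

-- ===== CLAIM (what is proved, stated in full; the proofs are below) =====
def Claim_equal_queryToBinary : Prop := ∀ (qi : List (Int × Int × Int × Int)) (cols : Int) (rows : Int), Dom_queryToBinary qi cols rows → Pre_queryToBinary qi cols rows → Spec_queryToBinary qi cols rows (queryToBinary qi cols rows)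

-- ===== LEMMAS AND PROOFS =====

-- pyRange 0 n 1 as a mapped Nat range
theorem pyRange_zero_cast (n : Int) :
    PySem.List.pyRange 0 n 1 = (List.range n.toNat).map Int.ofNat := by
  rw [PySem.List.pyRange_one]
  simp only [Int.sub_zero]
  exact List.map_congr_left (fun k _ => by simp)

-- a fold of conditional modifies at ONE fixed index commutes out to a single modify
theorem foldl_modify_fixed {α β : Type} (i : Nat) (g : β → α → α) (P : β → Prop)
    [DecidablePred P] :
    ∀ (L : List β) (b : List α),
      L.foldl (fun b j => if P j then b.modify i (g j) else b) b
        = b.modify i (fun r => L.foldl (fun r j => if P j then g j r else r) r) := by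
  intro L
  induction L with
  | nil =>
    intro b
    simp only [List.foldl_nil]
    exact (List.modify_id i b).symm
  | cons j L ih =>
    intro b
    by_cases h : P j
    · simp only [List.foldl_cons, if_pos h, ih, List.modify_modify_eq, Function.comp_def]
    · simp only [List.foldl_cons, if_neg h, ih]

-- modify in the left part of an append
theorem modify_append_left {α : Type} (u : α → α) (l t : List α) (i : Nat) (h : i < l.length) :
    (l ++ t).modify i u = l.modify i u ++ t := by
  induction l generalizing i with
  | nil => simp at h
  | cons x l ih =>
    cases i with
    | zero => simp [List.modify_zero_cons]
    | succ i =>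
      simp only [List.cons_append, List.modify_succ_cons]
      rw [ih i (by simpa using h)]

-- modify exactly at the seam of an append
theorem modify_append_seam {α : Type} (u : α → α) (l : List α) (z : α) :
    (l ++ [z]).modify l.length u = l ++ [u z] := by
  induction l with
  | nil => simp [List.modify_zero_cons]
  | cons x l ih => simp only [List.cons_append, List.length_cons, List.modify_succ_cons, ih]

-- conditional modifies at indices below l.length do not touch an appended tail
theorem foldl_modify_append {α : Type} (u : α → α) (Q : Nat → Prop) [DecidablePred Q] :
    ∀ (L : List Nat) (l t : List α), (∀ i ∈ L, i < l.length) →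
      L.foldl (fun b i => if Q i then b.modify i u else b) (l ++ t)
        = (L.foldl (fun b i => if Q i then b.modify i u else b) l) ++ t := by
  intro L
  induction L with
  | nil => intro l t _; simp
  | cons i L ih =>
    intro l t h
    have hi : i < l.length := h i (List.mem_cons_self ..)
    have htl : ∀ k ∈ L, k < (l.modify i u).length := by
      intro k hk
      rw [List.length_modify]
      exact h k (List.mem_cons_of_mem _ hk)
    by_cases hq : Q i
    · simp only [List.foldl_cons, if_pos hq, modify_append_left u l t i hi, ih _ t htl]
    · simp only [List.foldl_cons, if_neg hq,
        ih l t (fun k hk => h k (List.mem_cons_of_mem _ hk))]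

-- the main loop shape: a conditional modify over range n on a constant matrix is a map
theorem foldl_range_modify_map {α : Type} (u : α → α) (Q : Nat → Prop) [DecidablePred Q] :
    ∀ (n : Nat) (z : α),
      (List.range n).foldl (fun b i => if Q i then b.modify i u else b)
          ((List.range n).map (fun _ => z))
        = (List.range n).map (fun i => if Q i then u z else z) := by
  intro n
  induction n with
  | zero => intro z; simp
  | succ n ih =>
    intro z
    have hlt : ∀ i ∈ List.range n, i < ((List.range n).map (fun _ => z)).length := by
      intro i hi
      simpa using List.mem_range.mp hi
    rw [List.range_succ, List.map_append, List.map_append, List.foldl_append,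
        foldl_modify_append u Q (List.range n) _ _ hlt, ih]
    simp only [List.foldl_cons, List.foldl_nil, List.map_cons, List.map_nil]
    by_cases hq : Q n
    · have hseam := modify_append_seam u ((List.range n).map (fun i => if Q i then u z else z)) z
      have hlen : ((List.range n).map (fun i => if Q i then u z else z)).length = n := by simp
      rw [hlen] at hseam
      rw [if_pos hq, if_pos hq, hseam]
    · rw [if_neg hq, if_neg hq]

-- A on a cons input, in closed map form
theorem A_cons (rlo rhi clo chi : Int) (t : List (Int × Int × Int × Int)) (cols rows : Int) :
    queryToBinary ((rlo, rhi, clo, chi) :: t) cols rows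
      = (List.range rows.toNat).map (fun i =>
          if rlo ≤ Int.ofNat i ∧ Int.ofNat i ≤ rhi
          then (List.range cols.toNat).map
                 (fun j => if clo ≤ Int.ofNat j ∧ Int.ofNat j ≤ chi then (1 : Int) else 0)
          else List.replicate cols.toNat (0 : Int)) := by
  rw [queryToBinary.eq_def]
  simp only []
  have hfind : List.find? (fun f => (f.1, f.2.1) == ((rlo : Int), (rhi : Int)))
      ((rlo, rhi, clo, chi) :: t) = some (rlo, rhi, clo, chi) :=
    List.find?_cons_of_pos (by simp)
  rw [hfind]
  simp only [pyRange_zero_cast, List.foldl_map, List.map_map, Function.comp_def,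
    show ∀ n : Nat, (Int.ofNat n).toNat = n from fun n => rfl]
  have hinner : ∀ (i : Nat) (b : List (List Int)),
      (List.range cols.toNat).foldl
          (fun b' j => if clo ≤ Int.ofNat j ∧ Int.ofNat j ≤ chi
            then b'.modify i (fun row => row.set j 1) else b') b
        = b.modify i (fun r => (List.range cols.toNat).foldl
            (fun r j => if clo ≤ Int.ofNat j ∧ Int.ofNat j ≤ chi then r.set j 1 else r) r) :=
    fun i b => foldl_modify_fixed i (fun j row => row.set j 1)
      (fun j => clo ≤ Int.ofNat j ∧ Int.ofNat j ≤ chi) (List.range cols.toNat) b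
  simp only [hinner]
  rw [foldl_range_modify_map
      (fun r => (List.range cols.toNat).foldl
        (fun r j => if clo ≤ Int.ofNat j ∧ Int.ofNat j ≤ chi then r.set j 1 else r) r)
      (fun i => rlo ≤ Int.ofNat i ∧ Int.ofNat i ≤ rhi) rows.toNat
      ((List.range cols.toNat).map (fun _ => (0 : Int)))]
  have hrow : (List.range cols.toNat).foldl
        (fun r j => if clo ≤ Int.ofNat j ∧ Int.ofNat j ≤ chi then r.set j 1 else r)
        ((List.range cols.toNat).map (fun _ => (0 : Int)))
      = (List.range cols.toNat).map
          (fun j => if clo ≤ Int.ofNat j ∧ Int.ofNat j ≤ chi then (1 : Int) else 0) := by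
    simp only [List.set_eq_modify]
    exact foldl_range_modify_map (fun _ => (1 : Int))
      (fun j => clo ≤ Int.ofNat j ∧ Int.ofNat j ≤ chi) cols.toNat 0
  rw [hrow]
  simp [List.map_const']

-- B on a cons input, in the same closed map form
theorem B_cons (rlo rhi clo chi : Int) (t : List (Int × Int × Int × Int)) (cols rows : Int) :
    queryToBinary_alt ((rlo, rhi, clo, chi) :: t) cols rows
      = (List.range rows.toNat).map (fun i =>
          if rlo ≤ Int.ofNat i ∧ Int.ofNat i ≤ rhi
          then (List.range cols.toNat).map
                 (fun j => if clo ≤ Int.ofNat j ∧ Int.ofNat j ≤ chi then (1 : Int) else 0)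
          else List.replicate cols.toNat (0 : Int)) := by
  by_cases h : rows ≤ 0
  · simp [queryToBinary_alt, h, Int.toNat_of_nonpos h]
  · simp only [queryToBinary_alt, if_neg h, pyRange_zero_cast, List.map_map, Function.comp_def]

-- ===== VERDICT (by name: the statement is the Claim_ definition above) =====
theorem queryToBinary_spec : Claim_equal_queryToBinary := by
  intro qi cols rows _ hpre
  unfold Spec_queryToBinary
  match qi with
  | [] => exact absurd rfl hpre
  | (rlo, rhi, clo, chi) :: t => rw [A_cons, B_cons]
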